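-- pv_equiv track=rewrite | github.com/liuzhonghe060718/DS-AIgo | 树/代码/无限二叉树的查找.py | count_moves
-- ===== SOURCE A (Python) =====
-- def count_moves(i, j):
--     left_moves = 0
--     right_moves = 0
--
--     while i != 1 and j != 1:  # 终止条件: (1,1)
--         if i > j:
--             left_moves += i // j  # 计算可以跳跃多少次
--             i %= j  # 直接更新 i，减少迭代次数
--             if i == 0:  # 避免 ZeroDivisionError
--                 i = 1
--         else:
--             right_moves += j // i  # 计算可以跳跃多少次
--             j %= i  # 直接更新 j，减少迭代次数
--             if j == 0:  # 避免 ZeroDivisionError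
--                 j = 1
--
--     # 可能 i != 1 或 j != 1，需要再补一次
--     if i > 1:
--         left_moves += i - 1
--     elif j > 1:
--         right_moves += j - 1
--
--     return left_moves, right_moves
-- ===== SOURCE B (Python) =====
-- def count_moves(i, j):
--     if i == 1 or j == 1:
--         return (i - 1 if i > 1 else 0, j - 1 if j > 1 else 0)
--     if i > j:
--         q, r = divmod(i, j)
--         left, right = count_moves(r if r else 1, j)
--         return (q + left, right)
--     else:
--         q, r = divmod(j, i)
--         left, right = count_moves(i, r if r else 1)
--         return (left, q + right)
-- ===== Notes on version B (the rewrite author's own statement) =====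
-- stated objective: alternative
-- what changed: The imperative while-loop with two mutable accumulators and a post-loop fixup is replaced by a self-contained recursive function over the same Euclidean recurrence: the base case returns the final correction directly and each recursive call adds the quotient to the matching component of the returned pair.
-- outside the precondition, e.g. on count_moves(2, -1): A returns (-2, 0), B returns (-2, 0)
import Mathlib
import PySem

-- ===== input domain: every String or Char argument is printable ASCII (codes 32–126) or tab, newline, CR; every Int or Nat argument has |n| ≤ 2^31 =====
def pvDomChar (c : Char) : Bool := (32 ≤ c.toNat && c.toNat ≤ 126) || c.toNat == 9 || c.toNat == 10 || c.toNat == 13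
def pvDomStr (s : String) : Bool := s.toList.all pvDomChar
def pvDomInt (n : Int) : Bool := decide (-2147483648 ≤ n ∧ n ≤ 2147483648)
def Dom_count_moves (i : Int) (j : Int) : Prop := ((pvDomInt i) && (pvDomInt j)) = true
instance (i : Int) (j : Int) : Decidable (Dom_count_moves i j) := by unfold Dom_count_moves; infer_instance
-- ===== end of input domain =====

-- B replaces A's imperative while-loop with two mutable accumulators by a recursive
-- function over the same Euclidean recurrence (alternative decomposition, same cost).


-- ===== PORT A =====
-- A's while-loop over state (i, j, left_moves, right_moves); fuel only makes the
-- recursion total (on Pre_ the loop makes at most i+j iterations, so fuel suffices).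
def countMovesLoop : Nat → Int → Int → Int → Int → Int × Int × Int × Int
  | 0, i, j, l, r => (i, j, l, r)
  | n + 1, i, j, l, r =>
    if i ≠ 1 ∧ j ≠ 1 then
      if i > j then
        let l := l + PySem.Int.floordiv i j
        let i := PySem.Int.mod i j
        let i := if i = 0 then 1 else i
        countMovesLoop n i j l r
      else
        let r := r + PySem.Int.floordiv j i
        let j := PySem.Int.mod j i
        let j := if j = 0 then 1 else j
        countMovesLoop n i j l r
    else (i, j, l, r)

def count_moves (i : Int) (j : Int) : Int × Int :=
  let s := countMovesLoop ((i + j).toNat + 2) i j 0 0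
  if s.1 > 1 then (s.2.2.1 + (s.1 - 1), s.2.2.2)
  else if s.2.1 > 1 then (s.2.2.1, s.2.2.2 + (s.2.1 - 1))
  else (s.2.2.1, s.2.2.2)

-- ===== PORT B =====
-- Source B's recursion; fuel only makes it total (on Pre_ the depth is at most i+j).
def countMovesRec : Nat → Int → Int → Int × Int
  | 0, _, _ => (0, 0)
  | n + 1, i, j =>
    if i = 1 ∨ j = 1 then
      ((if i > 1 then i - 1 else 0), (if j > 1 then j - 1 else 0))
    else if i > j then
      let q := PySem.Int.floordiv i j
      let r := PySem.Int.mod i j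
      let p := countMovesRec n (if r = 0 then 1 else r) j
      (q + p.1, p.2)
    else
      let q := PySem.Int.floordiv j i
      let r := PySem.Int.mod j i
      let p := countMovesRec n i (if r = 0 then 1 else r)
      (p.1, q + p.2)

def count_moves_alt (i : Int) (j : Int) : Int × Int :=
  countMovesRec ((i + j).toNat + 2) i j

-- ===== PRECONDITION & SPEC =====
-- Pre_ restricts to the natural domain of tree coordinates (i, j ≥ 1), plus the
-- degenerate inputs with i = 1 or j = 1 where the loop never runs; outside it A
-- raises ZeroDivisionError or loops forever on most inputs, and its values on the
-- remaining negative coordinates are accidental (B happens to match them anyway).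
def Pre_count_moves (i : Int) (j : Int) : Prop := (1 ≤ i ∧ 1 ≤ j) ∨ i = 1 ∨ j = 1
instance (i : Int) (j : Int) : Decidable (Pre_count_moves i j) := by unfold Pre_count_moves; infer_instance
def pvWitness_count_moves : Int × Int := (13, 8)

def Spec_count_moves (i : Int) (j : Int) (out : Int × Int) : Prop := out = count_moves_alt i j
instance (i : Int) (j : Int) (out : Int × Int) : Decidable (Spec_count_moves i j out) := by unfold Spec_count_moves; infer_instance

-- ===== CLAIM (what is proved, stated in full; the proofs are below) =====
def Claim_equal_count_moves : Prop := ∀ (i : Int) (j : Int), Dom_count_moves i j → Pre_count_moves i j → Spec_count_moves i j (count_moves i j)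

-- ===== LEMMAS AND PROOFS =====

-- the post-loop fixup of A, applied to the loop's final state
def cmFix : Int × Int × Int × Int → Int × Int
  | (i, j, l, r) =>
    if i > 1 then (l + (i - 1), r)
    else if j > 1 then (l, r + (j - 1))
    else (l, r)

lemma cmFix_count_moves (i j : Int) :
    count_moves i j = cmFix (countMovesLoop ((i + j).toNat + 2) i j 0 0) := by
  simp only [count_moves, cmFix]

lemma key : ∀ n m : Nat, ∀ i j l r : Int, 1 ≤ i → 1 ≤ j → i + j ≤ n → i + j ≤ m →
    cmFix (countMovesLoop n i j l r) =
      (l + (countMovesRec m i j).1, r + (countMovesRec m i j).2) := by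
  intro n
  induction n with
  | zero => intro m i j l r hi hj hn _; omega
  | succ n ih =>
    intro m i j l r hi hj hn hm
    match m with
    | 0 => omega
    | Nat.succ m =>
      by_cases hbase : i = 1 ∨ j = 1
      · have hcond : ¬ (i ≠ 1 ∧ j ≠ 1) := by tauto
        simp only [countMovesLoop, countMovesRec, if_pos hbase, if_neg hcond, cmFix]
        rcases hbase with h1 | h1 <;> subst h1 <;> split_ifs <;> simp <;> omega
      · push Not at hbase
        have hi2 : 2 ≤ i := by rcases hbase with ⟨h1, _⟩; omega
        have hj2 : 2 ≤ j := by rcases hbase with ⟨_, h2⟩; omega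
        have hcond : (i ≠ 1 ∧ j ≠ 1) := ⟨by omega, by omega⟩
        have hbase' : ¬ (i = 1 ∨ j = 1) := by tauto
        simp only [countMovesLoop, countMovesRec, if_pos hcond, if_neg hbase']
        by_cases hij : i > j
        · simp only [if_pos hij]
          set r0 := PySem.Int.mod i j with hr0
          have hmod : r0 = i % j := by
            rw [hr0, PySem.Int.mod_eq_emod_of_pos (by omega)]
          have hb1 : 0 ≤ i % j := Int.emod_nonneg i (by omega)
          have hb2 : i % j < j := Int.emod_lt_of_pos i (by omega)
          set i' := if r0 = 0 then 1 else r0 with hi'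
          have h1i' : 1 ≤ i' := by rw [hi']; split_ifs <;> omega
          have hlt : i' < i := by rw [hi']; split_ifs <;> omega
          rw [ih m i' j _ _ h1i' (by omega) (by omega) (by omega)]
          simp [add_assoc]
        · simp only [if_neg hij]
          set r0 := PySem.Int.mod j i with hr0
          have hmod : r0 = j % i := by
            rw [hr0, PySem.Int.mod_eq_emod_of_pos (by omega)]
          have hb1 : 0 ≤ j % i := Int.emod_nonneg j (by omega)
          have hb2 : j % i < i := Int.emod_lt_of_pos j (by omega)
          set j' := if r0 = 0 then 1 else r0 with hj'
          have h1j' : 1 ≤ j' := by rw [hj']; split_ifs <;> omega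
          have hlt : j' < j := by rw [hj']; split_ifs <;> omega
          rw [ih m i j' _ _ hi h1j' (by omega) (by omega)]
          simp [add_assoc]

-- ===== VERDICT (by name: the statement is the Claim_ definition above) =====
theorem count_moves_spec : Claim_equal_count_moves := by
  intro i j _ hpre
  unfold Spec_count_moves count_moves_alt
  rcases hpre with ⟨hi, hj⟩ | h1 | h1
  · rw [cmFix_count_moves,
      key ((i + j).toNat + 2) ((i + j).toNat + 2) i j 0 0 hi hj (by omega) (by omega)]
    simp
  · subst h1
    simp only [count_moves, countMovesLoop, countMovesRec]
    norm_num
    split_ifs <;> simp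
  · subst h1
    simp only [count_moves, countMovesLoop, countMovesRec]
    norm_num
    split_ifs <;> simp
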